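-- pv_equiv track=rewrite | github.com/CMU-Notes/notes-template | check_formatting.py | _find_variable_blocks
-- ===== SOURCE A (Python) =====
-- def _find_variable_blocks(lines):
--     """Find line ranges for variable commands (\title, \lhead, etc.) that may span multiple lines.
--     Returns dict: command_key -> (start_idx, end_idx_exclusive)"""
--     keys = ['\\title', '\\lhead', '\\rhead', '\\author', '\\date']
--     blocks = {}
--     i = 0
--     while i < len(lines):
--         line = lines[i]
--         matched_key = None
--         for k in keys:
--             if k in line:
--                 matched_key = k
--                 break
--         if matched_key:
--             # Count braces to find where the command ends
--             start = i
--             depth = 0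
--             for ch in line:
--                 if ch == '{':
--                     depth += 1
--                 elif ch == '}':
--                     depth -= 1
--             i += 1
--             while depth > 0 and i < len(lines):
--                 for ch in lines[i]:
--                     if ch == '{':
--                         depth += 1
--                     elif ch == '}':
--                         depth -= 1
--                 i += 1
--             blocks[matched_key] = (start, i)
--         else:
--             i += 1
--     return blocks
-- ===== SOURCE B (Python) =====
-- def _find_variable_blocks(lines):
--     """Different algorithm: (1) one arithmetic pass builds prefix sums P of
--     per-line brace deltas; (2) one backward monotonic-stack pass precomputes
--     nxt[i] = the smallest m > i with P[m] <= P[i] (n if none) -- i.e. the line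
--     index just past the balanced block opened at line i; (3) a driver walks the
--     lines, and on a key line jumps directly to the precomputed block end."""
--     keys = ['\\title', '\\lhead', '\\rhead', '\\author', '\\date']
--     n = len(lines)
--     P = [0]
--     acc = 0
--     for line in lines:
--         acc += line.count('{') - line.count('}')
--         P.append(acc)
--     nxt = [n] * (n + 1)
--     stack = []
--     for i in range(n, -1, -1):
--         while stack and P[stack[-1]] > P[i]:
--             stack.pop()
--         if stack:
--             nxt[i] = stack[-1]
--         stack.append(i)
--     blocks = {}
--     i = 0
--     while i < n:
--         key = next((k for k in keys if k in lines[i]), None)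
--         if key is None:
--             i += 1
--         else:
--             end = nxt[i]
--             blocks[key] = (i, end)
--             i = end
--     return blocks
-- ===== Notes on version B (the rewrite author's own statement) =====
-- stated objective: alternative
-- what changed: Replaces A's interleaved scan (per-key-line inner while loop that re-counts braces character by character) with a three-stage algorithm: a pass building prefix sums of per-line brace deltas, a backward monotonic-stack pass precomputing for every line the index nxt[i] of the first later prefix-sum not above P[i] (i.e. each block's exclusive end), and a driver that jumps from each key line straight to its precomputed end.
import Mathlib
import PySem

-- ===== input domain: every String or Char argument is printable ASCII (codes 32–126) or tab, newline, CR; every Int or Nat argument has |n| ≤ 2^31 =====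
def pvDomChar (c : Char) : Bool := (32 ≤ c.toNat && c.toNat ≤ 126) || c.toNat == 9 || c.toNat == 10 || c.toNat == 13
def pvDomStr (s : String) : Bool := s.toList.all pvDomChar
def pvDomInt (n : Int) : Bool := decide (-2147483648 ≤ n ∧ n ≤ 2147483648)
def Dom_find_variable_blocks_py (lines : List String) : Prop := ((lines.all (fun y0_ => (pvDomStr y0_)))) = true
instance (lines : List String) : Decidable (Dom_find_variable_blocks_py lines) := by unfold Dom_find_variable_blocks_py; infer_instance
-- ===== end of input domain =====

-- B replaces A's interleaved scanning (per-key-line inner while loop counting braces char by char) by a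
-- three-stage algorithm: prefix sums of per-line brace deltas, a backward monotonic-stack pass precomputing
-- every block end, and a driver that jumps; same answers, different algorithm (objective: alternative).

-- ===== PORT A =====
def keysA : List String := ["\\title", "\\lhead", "\\rhead", "\\author", "\\date"]

-- A's per-character brace-depth loop
def pyNet (d : Int) (l : List Char) : Int :=
  l.foldl (fun depth ch => if ch = '{' then depth + 1 else if ch = '}' then depth - 1 else depth) d

-- A's inner 'while depth > 0 and i < len(lines)': returns (lines consumed, remaining lines)
def skipA : List String → Int → Nat × List String
  | rest, depth =>
    if 0 < depth then
      match rest with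
      | [] => (0, [])
      | l :: t =>
        let nr := skipA t (pyNet depth l.toList)
        (nr.1 + 1, nr.2)
    else (0, rest)

theorem skipA_nonpos (rest : List String) (d : Int) (h : ¬ 0 < d) : skipA rest d = (0, rest) := by
  rw [skipA.eq_def]; simp [h]

theorem skipA_pos_nil (d : Int) (h : 0 < d) : skipA [] d = (0, []) := by
  rw [skipA.eq_def]; simp [h]

theorem skipA_pos_cons (l : String) (t : List String) (d : Int) (h : 0 < d) :
    skipA (l :: t) d = ((skipA t (pyNet d l.toList)).1 + 1, (skipA t (pyNet d l.toList)).2) := by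
  rw [skipA.eq_def]; simp [h]

theorem skipA_snd_length (rest : List String) (d : Int) : (skipA rest d).2.length ≤ rest.length := by
  induction rest generalizing d with
  | nil =>
    by_cases h : 0 < d
    · rw [skipA_pos_nil d h]
    · rw [skipA_nonpos [] d h]
  | cons l t ih =>
    by_cases h : 0 < d
    · rw [skipA_pos_cons l t d h]
      exact Nat.le_succ_of_le (ih (pyNet d l.toList))
    · rw [skipA_nonpos (l :: t) d h]

-- A's outer 'while i < len(lines)' loop
def loopA : List String → Int → PySem.Dict String (Int × Int) → PySem.Dict String (Int × Int)
  | [], _, blocks => blocks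
  | line :: t, i, blocks =>
    match keysA.find? (fun k => PySem.Str.isIn k line) with
    | some k =>
      let nr := skipA t (pyNet 0 line.toList)
      loopA nr.2 (i + 1 + (nr.1 : Int)) (blocks.insert k (i, i + 1 + (nr.1 : Int)))
    | none => loopA t (i + 1) blocks
  termination_by rest _ _ => rest.length
  decreasing_by
  · exact Nat.lt_succ_of_le (skipA_snd_length t (pyNet 0 line.toList))
  · simp

def find_variable_blocks_py (lines : List String) : List (String × Int × Int) :=
  (loopA lines 0 PySem.Dict.empty).items

-- ===== PORT B =====
def keysB : List String := ["\\title", "\\lhead", "\\rhead", "\\author", "\\date"]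

-- line.count('{') - line.count('}')
def deltaB (line : String) : Int :=
  (PySem.Str.count line "{" : Int) - (PySem.Str.count line "}" : Int)

-- stage 1: the running prefix sums appended one per line ('acc += …; P.append(acc)')
def prefGo : Int → List String → List Int
  | _, [] => []
  | a, l :: t => (a + deltaB l) :: prefGo (a + deltaB l) t

def prefB (lines : List String) : List Int := 0 :: prefGo 0 lines

-- stage 2, backward pass i = n, n-1, …, 0: pop the stack while P[top] > P[i] (dropWhile),
-- record nxt[i] = top if any else n, push i; result list is [nxt[0], …, nxt[n]]
def nxtGo (P : Nat → Int) (n : Nat) : Nat → List Nat → List Nat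
  | 0, s => [(s.dropWhile (fun j => decide (P 0 < P j))).headD n]
  | i+1, s =>
    let s' := s.dropWhile (fun j => decide (P (i+1) < P j))
    nxtGo P n i ((i+1) :: s') ++ [s'.headD n]

def nxtList (lines : List String) : List Nat :=
  nxtGo (fun m => (prefB lines).getD m 0) lines.length lines.length []

-- stage 3: the driver 'while i < n' that jumps from a key line straight to nxt[i]
-- (fuel only makes the recursion structural; i strictly increases each step, so n+1 steps never run out)
def driveB (lines : List String) (nxt : List Nat) : Nat → Nat → PySem.Dict String (Int × Int) → PySem.Dict String (Int × Int)
  | 0, _, blocks => blocks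
  | fuel+1, i, blocks =>
    if i < lines.length then
      match keysB.find? (fun k => PySem.Str.isIn k (lines.getD i "")) with
      | none => driveB lines nxt fuel (i+1) blocks
      | some k =>
        let e := nxt.getD i lines.length
        driveB lines nxt fuel e (blocks.insert k ((i : Int), (e : Int)))
    else blocks

def find_variable_blocks_py_alt (lines : List String) : List (String × Int × Int) :=
  (driveB lines (nxtList lines) (lines.length + 1) 0 PySem.Dict.empty).items

-- ===== PRECONDITION & SPEC =====
def Spec_find_variable_blocks_py (lines : List String) (out : List (String × Int × Int)) : Prop := out = find_variable_blocks_py_alt lines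
instance (lines : List String) (out : List (String × Int × Int)) : Decidable (Spec_find_variable_blocks_py lines out) := by unfold Spec_find_variable_blocks_py; infer_instance

-- ===== CLAIM (what is proved, stated in full; the proofs are below) =====
def Claim_equal_find_variable_blocks_py : Prop := ∀ (lines : List String), Dom_find_variable_blocks_py lines → Spec_find_variable_blocks_py lines (find_variable_blocks_py lines)

-- ===== LEMMAS AND PROOFS =====

-- single-character substring count is the character count
theorem count_go_single (c : Char) : ∀ (fuel : Nat) (s : List Char) (acc : Nat), s.length ≤ fuel →
    PySem.Chars.count.go [c] fuel s acc = acc + s.count c := by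
  intro fuel
  induction fuel with
  | zero =>
    intro s acc h
    have : s = [] := List.length_eq_zero_iff.mp (Nat.le_zero.mp h)
    subst this; rw [PySem.Chars.count.go]; simp
  | succ n ih =>
    intro s acc h
    cases s with
    | nil => rw [PySem.Chars.count.go]; simp; omega
    | cons x t =>
      rw [PySem.Chars.count.go]
      by_cases hc : c = x
      · subst hc
        have hp : List.isPrefixOf [c] (c :: t) = true := by simp [List.isPrefixOf]
        rw [if_pos hp]
        have hdrop : List.drop ([c] : List Char).length (c :: t) = t := by simp
        rw [hdrop, ih t (acc + 1) (by simpa using Nat.le_of_succ_le_succ h)]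
        simp
        omega
      · have hp : List.isPrefixOf [c] (x :: t) = false := by
          simp [List.isPrefixOf, beq_false_of_ne hc]
        rw [if_neg (by simp [hp])]
        rw [ih t acc (Nat.le_of_succ_le_succ h)]
        simp [Ne.symm hc]

theorem count_single (s : List Char) (c : Char) : PySem.Chars.count s [c] = s.count c := by
  rw [PySem.Chars.count]
  simp only [List.isEmpty_cons, Bool.false_eq_true, if_false]
  simpa using count_go_single c s.length s 0 le_rfl

-- A's per-character depth loop equals the count difference
theorem pyNet_eq (l : List Char) (a : Int) : pyNet a l = a + (l.count '{' : Int) - (l.count '}' : Int) := by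
  induction l generalizing a with
  | nil => simp [pyNet]
  | cons x t ih =>
    simp only [pyNet, List.foldl_cons] at *
    rw [ih]
    by_cases h1 : x = '{'
    · subst h1; simp; omega
    · by_cases h2 : x = '}'
      · subst h2; simp; omega
      · simp [h1, h2]

theorem deltaB_eq (line : String) (a : Int) : a + deltaB line = pyNet a line.toList := by
  rw [pyNet_eq, deltaB]
  have h1 : PySem.Str.count line "{" = line.toList.count '{' := by
    rw [PySem.Str.count_eq]; exact count_single _ _
  have h2 : PySem.Str.count line "}" = line.toList.count '}' := by
    rw [PySem.Str.count_eq]; exact count_single _ _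
  rw [h1, h2]; ring

-- prefix-sum recurrence: P (m+1) = P m + delta of line m
theorem prefGo_getD : ∀ (ls : List String) (a : Int) (m : Nat), m < ls.length →
    ((a :: prefGo a ls).getD (m+1) 0 = (a :: prefGo a ls).getD m 0 + deltaB (ls.getD m "")) := by
  intro ls
  induction ls with
  | nil => intro a m h; simp at h
  | cons l t ih =>
    intro a m h
    cases m with
    | zero => simp [prefGo]
    | succ m =>
      have h' : m < t.length := by simpa using h
      have := ih (a + deltaB l) m h'
      simpa [prefGo] using this

theorem pref_succ (lines : List String) (m : Nat) (h : m < lines.length) :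
    (prefB lines).getD (m+1) 0 = (prefB lines).getD m 0 + deltaB (lines.getD m "") :=
  prefGo_getD lines 0 m h

-- the search function characterising 'first index m ≥ start with P m ≤ x' (n if none)
def firstLeGo (P : Nat → Int) (n : Nat) (x : Int) (m : Nat) : Nat :=
  if n < m then n else if P m ≤ x then m else firstLeGo P n x (m+1)
  termination_by n + 1 - m
  decreasing_by omega

def firstLe (P : Nat → Int) (n : Nat) (i : Nat) : Nat := firstLeGo P n (P i) (i+1)

theorem firstLeGo_le (P : Nat → Int) (n : Nat) (x : Int) : ∀ m, firstLeGo P n x m ≤ n := by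
  intro m
  induction hK : n + 1 - m using Nat.strong_induction_on generalizing m with
  | _ K ih =>
    rw [firstLeGo]
    split
    · omega
    · split
      · omega
      · exact ih (n + 1 - (m+1)) (by omega) (m+1) rfl

theorem firstLeGo_spec (P : Nat → Int) (n : Nat) (x : Int) : ∀ m, m ≤ n →
    m ≤ firstLeGo P n x m ∧
    (∀ m', m ≤ m' → m' < firstLeGo P n x m → x < P m') ∧
    (P (firstLeGo P n x m) ≤ x ∨ firstLeGo P n x m = n) := by
  intro m
  induction hK : n + 1 - m using Nat.strong_induction_on generalizing m with
  | _ K ih =>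
    intro hm
    rw [firstLeGo]
    split
    · omega
    · split
      · refine ⟨le_rfl, fun m' h1 h2 => absurd h1 (by omega), Or.inl (by assumption)⟩
      · rename_i hnm hP
        by_cases hmn : m = n
        · have hfl : firstLeGo P n x (m+1) = n := by rw [firstLeGo, if_pos (by omega)]
          rw [hfl]
          exact ⟨by omega, fun m' h1 h2 => by omega, Or.inr rfl⟩
        · have h1 : m + 1 ≤ n := by omega
          obtain ⟨a, b, c⟩ := ih (n + 1 - (m+1)) (by omega) (m+1) rfl h1
          refine ⟨by omega, fun m' hm1 hm2 => ?_, c⟩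
          by_cases he : m' = m
          · subst he; omega
          · exact b m' (by omega) hm2

-- A's inner skip loop, read through prefix sums, lands exactly on firstLeGo
theorem skip_first (lines : List String) :
    ∀ K (m : Nat) (x : Int), lines.length - m ≤ K → m ≤ lines.length →
    firstLeGo (fun j => (prefB lines).getD j 0) lines.length x m
      = m + (skipA (lines.drop m) ((prefB lines).getD m 0 - x)).1 ∧
    (skipA (lines.drop m) ((prefB lines).getD m 0 - x)).2
      = lines.drop (m + (skipA (lines.drop m) ((prefB lines).getD m 0 - x)).1) := by
  intro K
  induction K with
  | zero =>
    intro m x hK hm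
    have hmn : m = lines.length := by omega
    subst hmn
    rw [List.drop_length]
    by_cases hd : 0 < (prefB lines).getD lines.length 0 - x
    · rw [skipA_pos_nil _ hd]
      refine ⟨?_, by rw [Nat.add_zero, List.drop_length]⟩
      rw [firstLeGo, if_neg (by omega)]
      split
      · omega
      · rw [firstLeGo, if_pos (by omega)]; omega
    · rw [skipA_nonpos _ _ hd]
      refine ⟨?_, by rw [Nat.add_zero, List.drop_length]⟩
      rw [firstLeGo, if_neg (by omega), if_pos (by omega)]
      omega
  | succ K ih =>
    intro m x hK hm
    by_cases hmn : m = lines.length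
    · subst hmn
      rw [List.drop_length]
      by_cases hd : 0 < (prefB lines).getD lines.length 0 - x
      · rw [skipA_pos_nil _ hd]
        refine ⟨?_, by rw [Nat.add_zero, List.drop_length]⟩
        rw [firstLeGo, if_neg (by omega)]
        split
        · omega
        · rw [firstLeGo, if_pos (by omega)]; omega
      · rw [skipA_nonpos _ _ hd]
        refine ⟨?_, by rw [Nat.add_zero, List.drop_length]⟩
        rw [firstLeGo, if_neg (by omega), if_pos (by omega)]
        omega
    · have hmlt : m < lines.length := by omega
      by_cases hd : 0 < (prefB lines).getD m 0 - x
      · have hdrop : lines.drop m = lines[m] :: lines.drop (m+1) := List.drop_eq_getElem_cons hmlt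
        rw [hdrop, skipA_pos_cons _ _ _ hd]
        have hnet : pyNet ((prefB lines).getD m 0 - x) lines[m].toList
            = (prefB lines).getD (m+1) 0 - x := by
          rw [← deltaB_eq, pref_succ lines m hmlt, List.getD_eq_getElem lines "" hmlt]
          ring
        rw [hnet]
        obtain ⟨h1, h2⟩ := ih (m+1) x (by omega) (by omega)
        constructor
        · rw [firstLeGo, if_neg (by omega), if_neg (by omega)]
          omega
        · rw [h2]
          congr 1
          omega
      · rw [skipA_nonpos _ _ hd]
        refine ⟨?_, by rw [Nat.add_zero]⟩
        rw [firstLeGo, if_neg (by omega), if_pos (by omega)]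
        omega

-- monotonic-stack invariant
def InvB (P : Nat → Int) (n i : Nat) (s : List Nat) : Prop :=
  (∀ j ∈ s, i < j ∧ j ≤ n) ∧
  s.Pairwise (· < ·) ∧
  s.Pairwise (fun a b => P b ≤ P a) ∧
  (∀ m, i < m → m ≤ n → ∃ j ∈ s, j ≤ m ∧ P j ≤ P m)

theorem dropWhile_head_false {α : Type} (p : α → Bool) :
    ∀ (l : List α) (a : α) (t : List α), l.dropWhile p = a :: t → p a = false := by
  intro l
  induction l with
  | nil => intro a t h; simp [List.dropWhile] at h
  | cons x xs ih =>
    intro a t h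
    rw [List.dropWhile_cons] at h
    split at h
    · exact ih a t h
    · rename_i hx
      obtain ⟨rfl, rfl⟩ : x = a ∧ xs = t := by simpa using h
      simpa using hx

theorem mem_dropWhile_of_not {α : Type} (p : α → Bool) :
    ∀ (l : List α) (x : α), x ∈ l → p x = false → x ∈ l.dropWhile p := by
  intro l
  induction l with
  | nil => intro x h; simp at h
  | cons y t ih =>
    intro x hx hp
    rw [List.dropWhile_cons]
    split
    · rename_i hy
      rcases List.mem_cons.mp hx with rfl | hxt
      · rw [hp] at hy; simp at hy
      · exact ih x hxt hp
    · exact hx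

theorem mem_of_mem_dropWhile {α : Type} (p : α → Bool) (l : List α) (x : α)
    (h : x ∈ l.dropWhile p) : x ∈ l :=
  (List.dropWhile_sublist (l := l) (p := p)).subset h

theorem inv_query (P : Nat → Int) (n i : Nat) (s : List Nat) (hInv : InvB P n i s) (hin : i ≤ n) :
    (s.dropWhile (fun j => decide (P i < P j))).headD n = firstLe P n i := by
  obtain ⟨hb, hlt, hanti, hcomp⟩ := hInv
  by_cases hi : i = n
  · subst hi
    have hs : s = [] := by
      cases s with
      | nil => rfl
      | cons a t => exact absurd (hb a (by simp)) (by omega)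
    subst hs
    rw [firstLe, firstLeGo, if_pos (by omega)]
    simp
  · have hin' : i + 1 ≤ n := by omega
    obtain ⟨hr1, hmin, hdisj⟩ := firstLeGo_spec P n (P i) (i+1) hin'
    have hrle : firstLeGo P n (P i) (i+1) ≤ n := firstLeGo_le P n (P i) (i+1)
    rw [firstLe]
    set r := firstLeGo P n (P i) (i+1) with hr
    cases hs' : s.dropWhile (fun j => decide (P i < P j)) with
    | nil =>
      simp only [List.headD_nil]
      by_contra hne
      have hrn : r ≠ n := fun he => hne he.symm
      have hPr : P r ≤ P i := hdisj.resolve_right hrn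
      obtain ⟨j, hjs, hjr, hPj⟩ := hcomp r (by omega) hrle
      have : j ∈ s.dropWhile (fun j => decide (P i < P j)) :=
        mem_dropWhile_of_not _ s j hjs (by simp; exact le_trans hPj hPr)
      rw [hs'] at this
      simp at this
    | cons h t =>
      simp only [List.headD_cons]
      have hhs : h ∈ s := by
        apply mem_of_mem_dropWhile (fun j => decide (P i < P j)) s
        rw [hs']; simp
      obtain ⟨hih, hhn⟩ := hb h hhs
      have hPh : P h ≤ P i := by
        have := dropWhile_head_false (fun j => decide (P i < P j)) s h t hs'
        simp at this; omega
      have hrh : r ≤ h := by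
        by_contra hc
        exact absurd (hmin h (by omega) (by omega)) (by omega)
      have hhr : h ≤ r := by
        rcases hdisj with hPr | hrn
        · obtain ⟨j, hjs, hjr, hPj⟩ := hcomp r (by omega) hrle
          have hjmem : j ∈ s.dropWhile (fun j => decide (P i < P j)) :=
            mem_dropWhile_of_not _ s j hjs (by simp; exact le_trans hPj hPr)
          rw [hs'] at hjmem
          rcases List.mem_cons.mp hjmem with rfl | hjt
          · exact hjr
          · have hpair : (h :: t).Pairwise (fun a b : Nat => a < b) := by
              rw [← hs']
              exact List.Pairwise.sublist (List.dropWhile_sublist _) hlt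
            have : h < j := (List.pairwise_cons.mp hpair).1 j hjt
            omega
        · omega
      omega

theorem inv_step (P : Nat → Int) (n i : Nat) (s : List Nat) (hInv : InvB P n (i+1) s) (h : i+1 ≤ n) :
    InvB P n i ((i+1) :: s.dropWhile (fun j => decide (P (i+1) < P j))) := by
  obtain ⟨hb, hlt, hanti, hcomp⟩ := hInv
  have hmem : ∀ j ∈ s.dropWhile (fun j => decide (P (i+1) < P j)), j ∈ s :=
    fun j hj => mem_of_mem_dropWhile _ s j hj
  have hub : ∀ j ∈ s.dropWhile (fun j => decide (P (i+1) < P j)), P j ≤ P (i+1) := by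
    intro j hj
    cases hs' : s.dropWhile (fun j => decide (P (i+1) < P j)) with
    | nil => rw [hs'] at hj; simp at hj
    | cons a t =>
      have hPa : P a ≤ P (i+1) := by
        have := dropWhile_head_false (fun j => decide (P (i+1) < P j)) s a t hs'
        simp at this; omega
      rw [hs'] at hj
      rcases List.mem_cons.mp hj with rfl | hjt
      · exact hPa
      · have hpair : (a :: t).Pairwise (fun x y : Nat => P y ≤ P x) := by
          rw [← hs']
          exact List.Pairwise.sublist (List.dropWhile_sublist _) hanti
        exact le_trans ((List.pairwise_cons.mp hpair).1 j hjt) hPa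
  refine ⟨?_, ?_, ?_, ?_⟩
  · intro j hj
    rcases List.mem_cons.mp hj with rfl | hj'
    · omega
    · obtain ⟨h1, h2⟩ := hb j (hmem j hj')
      exact ⟨by omega, h2⟩
  · rw [List.pairwise_cons]
    exact ⟨fun j hj => (hb j (hmem j hj)).1,
      List.Pairwise.sublist (List.dropWhile_sublist _) hlt⟩
  · rw [List.pairwise_cons]
    exact ⟨hub, List.Pairwise.sublist (List.dropWhile_sublist _) hanti⟩
  · intro m hm1 hm2
    by_cases hmi : m = i + 1
    · exact ⟨i+1, by simp, by omega, by rw [hmi]⟩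
    · obtain ⟨j, hjs, hjm, hPj⟩ := hcomp m (by omega) hm2
      by_cases hj2 : P (i+1) < P j
      · exact ⟨i+1, by simp, by omega, by omega⟩
      · refine ⟨j, ?_, hjm, hPj⟩
        exact List.mem_cons_of_mem _ (mem_dropWhile_of_not _ s j hjs (by simp; omega))

theorem length_nxtGo (P : Nat → Int) (n : Nat) : ∀ i s, (nxtGo P n i s).length = i + 1 := by
  intro i
  induction i with
  | zero => intro s; simp [nxtGo]
  | succ i ih => intro s; simp [nxtGo, ih]

theorem nxtGo_correct (P : Nat → Int) (n : Nat) : ∀ i s, i ≤ n → InvB P n i s →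
    ∀ j, j ≤ i → (nxtGo P n i s).getD j n = firstLe P n j := by
  intro i
  induction i with
  | zero =>
    intro s hi hInv j hj
    have : j = 0 := Nat.le_zero.mp hj
    subst this
    rw [nxtGo]
    simp only [List.getD_cons_zero]
    exact inv_query P n 0 s hInv hi
  | succ i ih =>
    intro s hi hInv j hj
    rw [nxtGo]
    by_cases hji : j ≤ i
    · rw [List.getD_append _ _ _ _ (by rw [length_nxtGo]; omega)]
      exact ih ((i+1) :: s.dropWhile (fun j => decide (P (i+1) < P j))) (by omega)
        (inv_step P n i s hInv hi) j hji
    · have : j = i + 1 := by omega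
      subst this
      rw [List.getD_append_right _ _ _ _ (by rw [length_nxtGo])]
      rw [length_nxtGo]
      simp only [Nat.sub_self, List.getD_cons_zero]
      exact inv_query P n (i+1) s hInv hi

theorem nxt_correct (lines : List String) (j : Nat) (hj : j ≤ lines.length) :
    (nxtList lines).getD j lines.length = firstLe (fun m => (prefB lines).getD m 0) lines.length j := by
  apply nxtGo_correct _ _ lines.length [] le_rfl _ j hj
  refine ⟨by simp, by simp, by simp, ?_⟩
  intro m h1 h2
  omega

-- driver ↔ A's outer loop
theorem drive_loop (lines : List String) :
    ∀ fuel (i : Nat) (blocks : PySem.Dict String (Int × Int)), i ≤ lines.length → lines.length - i < fuel →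
    driveB lines (nxtList lines) fuel i blocks = loopA (lines.drop i) (i : Int) blocks := by
  intro fuel
  induction fuel with
  | zero => intro i blocks hi hf; omega
  | succ fuel ih =>
    intro i blocks hi hf
    rw [driveB]
    by_cases hlt : i < lines.length
    · rw [if_pos hlt]
      have hdrop : lines.drop i = lines[i] :: lines.drop (i+1) := List.drop_eq_getElem_cons hlt
      have hgd : lines.getD i "" = lines[i] := List.getD_eq_getElem lines "" hlt
      rw [hdrop, loopA, hgd]
      have hkeys : keysB = keysA := rfl
      rw [hkeys]
      cases hfind : keysA.find? (fun k => PySem.Str.isIn k lines[i]) with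
      | none =>
        dsimp only
        rw [ih (i+1) blocks (by omega) (by omega)]
        have hcast : ((i+1 : Nat) : Int) = (i : Int) + 1 := by push_cast; ring
        rw [hcast]
      | some k =>
        dsimp only
        have h1 := deltaB_eq lines[i] 0
        have h2 := pref_succ lines i hlt
        rw [List.getD_eq_getElem lines "" hlt] at h2
        have hnet : pyNet 0 (lines[i].toList) = (prefB lines).getD (i+1) 0 - (prefB lines).getD i 0 := by
          omega
        obtain ⟨hc1, hc2⟩ := skip_first lines (lines.length - (i+1)) (i+1) ((prefB lines).getD i 0) le_rfl (by omega)
        have he : (nxtList lines).getD i lines.length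
            = (i+1) + (skipA (lines.drop (i+1)) ((prefB lines).getD (i+1) 0 - (prefB lines).getD i 0)).1 := by
          rw [nxt_correct lines i (by omega), firstLe]
          exact hc1
        have hfle := firstLeGo_le (fun m => (prefB lines).getD m 0) lines.length ((prefB lines).getD i 0) (i+1)
        have hle : (i+1) + (skipA (lines.drop (i+1)) ((prefB lines).getD (i+1) 0 - (prefB lines).getD i 0)).1 ≤ lines.length := by
          omega
        rw [hnet, he, hc2]
        rw [ih ((i+1) + (skipA (lines.drop (i+1)) ((prefB lines).getD (i+1) 0 - (prefB lines).getD i 0)).1) _ hle (by omega)]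
        have hcast : ((((i+1) + (skipA (lines.drop (i+1)) ((prefB lines).getD (i+1) 0 - (prefB lines).getD i 0)).1 : Nat)) : Int)
            = (i : Int) + 1 + ((skipA (lines.drop (i+1)) ((prefB lines).getD (i+1) 0 - (prefB lines).getD i 0)).1 : Int) := by
          push_cast; ring
        rw [hcast]
    · rw [if_neg hlt]
      have : lines.drop i = [] := List.drop_eq_nil_of_le (by omega)
      rw [this, loopA]

-- ===== VERDICT (by name: the statement is the Claim_ definition above) =====
theorem find_variable_blocks_py_spec : Claim_equal_find_variable_blocks_py := by
  intro lines _
  show find_variable_blocks_py lines = find_variable_blocks_py_alt lines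
  rw [find_variable_blocks_py, find_variable_blocks_py_alt]
  rw [drive_loop lines (lines.length + 1) 0 PySem.Dict.empty (Nat.zero_le _) (by omega)]
  rfl
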